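-- pv_equiv track=rewrite | github.com/focardi-francois-philippe/Atelier3 | ex1.py | position_tri
-- ===== SOURCE A (Python) =====
-- def est_triee(liste:list) -> bool:
--     listeEstTriee = True
--     i = 1
--
--     while i < len(liste) and listeEstTriee:
--         if liste[i-1] > liste[i]:
--             listeEstTriee = False
--         i+=1
--     return listeEstTriee
--
-- def position_tri(lst:list,element:int)->int:
--     debut =0
--     fin = len(lst)-1
--     trouve = False
--     index = 0
--
--     if(est_triee(lst)):
--         while(not trouve and debut<=fin):
--             index = int((debut+fin)/2)
--             if(lst[index] == element):
--                 trouve = True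
--             elif(element > lst[index]):
--                 debut = index + 1
--             else:
--                 fin = index-1
--     if(not trouve):
--         return -1
--     return index
-- ===== SOURCE B (Python) =====
-- def position_tri(lst, element):
--     if any(lst[i - 1] > lst[i] for i in range(1, len(lst))):
--         return -1
--
--     def search(lo, hi):
--         if lo > hi:
--             return -1
--         mid = (lo + hi) // 2
--         if lst[mid] == element:
--             return mid
--         if element > lst[mid]:
--             return search(mid + 1, hi)
--         return search(lo, mid - 1)
--
--     return search(0, len(lst) - 1)
-- ===== Notes on version B (the rewrite author's own statement) =====
-- stated objective: alternative
-- what changed: The early-exit while-loop sortedness flag becomes an any() over adjacent pairs, and the iterative binary-search loop with trouve/index state becomes a recursive search(lo, hi) helper; same asymptotic cost (O(n) guard + O(log n) search).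
import Mathlib
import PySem

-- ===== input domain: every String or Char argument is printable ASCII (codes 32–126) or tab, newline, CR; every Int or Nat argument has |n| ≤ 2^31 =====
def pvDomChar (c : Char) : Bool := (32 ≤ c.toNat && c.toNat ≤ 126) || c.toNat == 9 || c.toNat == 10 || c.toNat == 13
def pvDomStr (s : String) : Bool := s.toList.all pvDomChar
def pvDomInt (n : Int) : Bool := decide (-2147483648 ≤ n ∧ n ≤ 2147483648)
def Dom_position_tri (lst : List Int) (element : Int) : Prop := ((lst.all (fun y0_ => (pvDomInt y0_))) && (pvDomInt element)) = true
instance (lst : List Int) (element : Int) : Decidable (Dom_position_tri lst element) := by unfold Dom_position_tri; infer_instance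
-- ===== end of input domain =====

-- B replaces A's flag-driven while loops by an any() sortedness test and a recursive binary search (alternative decomposition, same cost).


-- ===== PORT A =====
-- while i < len(liste) and listeEstTriee: …  (index accesses liste[i-1], liste[i] are always in range here, so pyGetD is exact)
def estTrieeLoop (liste : List Int) (i : Nat) (flag : Bool) : Bool :=
  if i < liste.length ∧ flag then
    estTrieeLoop liste (i + 1)
      (if PySem.List.pyGetD liste ((i : Int) - 1) 0 > PySem.List.pyGetD liste (i : Int) 0 then false else flag)
  else flag
termination_by liste.length - i
decreasing_by omega

def est_triee (liste : List Int) : Bool := estTrieeLoop liste 1 true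

-- while(not trouve and debut<=fin): …  state = (debut, fin, trouve, index); returns the final (trouve, index).
-- int((debut+fin)/2) equals (debut+fin)/2 here: in every reachable state 0 ≤ debut, so debut+fin ≥ 0 when the loop runs.
-- lst[index] is always in range in reachable states, so pyGetD is exact.
def posLoop (lst : List Int) (element : Int) (debut fin : Int) (trouve : Bool) (index : Int) : Bool × Int :=
  if h : (!trouve) ∧ debut ≤ fin then
    let index' := (debut + fin) / 2
    if PySem.List.pyGetD lst index' 0 = element then (true, index')
    else if element > PySem.List.pyGetD lst index' 0 then
      posLoop lst element (index' + 1) fin trouve index'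
    else
      posLoop lst element debut (index' - 1) trouve index'
  else (trouve, index)
termination_by (fin + 1 - debut).toNat
decreasing_by all_goals omega

def position_tri (lst : List Int) (element : Int) : Int :=
  let p := if est_triee lst then posLoop lst element 0 ((lst.length : Int) - 1) false 0 else (false, 0)
  if p.1 then p.2 else -1

-- ===== PORT B =====
-- any(lst[i-1] > lst[i] for i in range(1, len(lst)))  (indices in range, pyGetD exact)
def sortedViolation (lst : List Int) : Bool :=
  (PySem.List.pyRange 1 lst.length 1).any
    (fun i => PySem.List.pyGetD lst (i - 1) 0 > PySem.List.pyGetD lst i 0)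

-- recursive search(lo, hi); mid = (lo+hi)//2 is Python floor division (lst[mid] in range in reachable calls)
def searchAlt (lst : List Int) (element : Int) (lo hi : Int) : Int :=
  if lo > hi then -1
  else
    let mid := PySem.Int.floordiv (lo + hi) 2
    if PySem.List.pyGetD lst mid 0 = element then mid
    else if element > PySem.List.pyGetD lst mid 0 then searchAlt lst element (mid + 1) hi
    else searchAlt lst element lo (mid - 1)
termination_by (hi + 1 - lo).toNat
decreasing_by
  all_goals
    have hmb := PySem.Int.floordiv_two_mid_bounds (lo := lo) (hi := hi) (by omega)
    omega

def position_tri_alt (lst : List Int) (element : Int) : Int :=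
  if sortedViolation lst then -1
  else searchAlt lst element 0 ((lst.length : Int) - 1)

-- ===== PRECONDITION & SPEC =====
def Spec_position_tri (lst : List Int) (element : Int) (out : Int) : Prop := out = position_tri_alt lst element
instance (lst : List Int) (element : Int) (out : Int) : Decidable (Spec_position_tri lst element out) := by unfold Spec_position_tri; infer_instance

-- ===== CLAIM (what is proved, stated in full; the proofs are below) =====
def Claim_equal_position_tri : Prop := ∀ (lst : List Int) (element : Int), Dom_position_tri lst element → Spec_position_tri lst element (position_tri lst element)

-- ===== LEMMAS AND PROOFS =====

-- once the flag is false, A's sortedness loop stays false (the while condition fails)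
theorem estTrieeLoop_false (liste : List Int) (i : Nat) : estTrieeLoop liste i false = false := by
  rw [estTrieeLoop]; simp

-- A's sortedness loop from index i with flag true = no adjacent violation on range(i, len)
theorem estTrieeLoop_true (liste : List Int) :
    ∀ (n i : Nat), liste.length - i ≤ n →
    estTrieeLoop liste i true
      = !((PySem.List.pyRange (i : Int) liste.length 1).any
          (fun j => PySem.List.pyGetD liste (j - 1) 0 > PySem.List.pyGetD liste j 0)) := by
  intro n
  induction n with
  | zero =>
    intro i h
    have hle : (liste.length : Int) ≤ (i : Int) := by exact_mod_cast Nat.le_of_sub_eq_zero (by omega)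
    rw [estTrieeLoop, PySem.List.pyRange_one_eq_nil hle]
    simp [show ¬ (i < liste.length) by omega]
  | succ n ih =>
    intro i h
    by_cases hi : i < liste.length
    · have hlt : (i : Int) < (liste.length : Int) := by exact_mod_cast hi
      rw [estTrieeLoop, PySem.List.pyRange_one_cons hlt]
      rw [if_pos (⟨hi, rfl⟩ : i < liste.length ∧ (true : Bool) = true)]
      by_cases hv : PySem.List.pyGetD liste ((i : Int) - 1) 0 > PySem.List.pyGetD liste (i : Int) 0
      · rw [if_pos hv, estTrieeLoop_false]
        simp only [List.any_cons, decide_eq_true hv, Bool.true_or, Bool.not_true]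
      · rw [if_neg hv]
        rw [ih (i + 1) (by omega)]
        simp only [List.any_cons, decide_eq_false hv, Bool.false_or, Nat.cast_add, Nat.cast_one]
    · have hle : (liste.length : Int) ≤ (i : Int) := by exact_mod_cast Nat.le_of_not_lt hi
      rw [estTrieeLoop, PySem.List.pyRange_one_eq_nil hle]
      simp [hi]

-- A's binary-search loop (started with trouve = false), post-processed as A does, equals B's recursive search
theorem posLoop_eq_searchAlt (lst : List Int) (e : Int) :
    ∀ (n : Nat) (lo hi idx : Int), (hi + 1 - lo).toNat ≤ n → 0 ≤ lo →
      (if (posLoop lst e lo hi false idx).1 then (posLoop lst e lo hi false idx).2 else -1)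
        = searchAlt lst e lo hi := by
  intro n
  induction n with
  | zero =>
    intro lo hi idx hn hlo
    have hgt : lo > hi := by omega
    rw [posLoop, searchAlt]
    simp [hgt, show ¬ (lo ≤ hi) by omega]
  | succ n ih =>
    intro lo hi idx hn hlo
    by_cases hle : lo ≤ hi
    · have hmid := PySem.Int.floordiv_two_mid_bounds (lo := lo) (hi := hi) hle
      have hdiv : (lo + hi) / 2 = PySem.Int.floordiv (lo + hi) 2 :=
        (PySem.Int.floordiv_eq_ediv_of_pos (by omega)).symm
      rw [posLoop, searchAlt]
      simp only [hle, and_true, Bool.not_false, dite_true, show ¬ (lo > hi) by omega, if_neg,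
        not_false_iff]
      rw [hdiv]
      set mid := PySem.Int.floordiv (lo + hi) 2 with hm
      by_cases h1 : PySem.List.pyGetD lst mid 0 = e
      · simp [h1]
      · simp only [if_neg h1]
        by_cases h2 : e > PySem.List.pyGetD lst mid 0
        · simp only [if_pos h2]
          exact ih (mid + 1) hi mid (by omega) (by omega)
        · simp only [if_neg h2]
          exact ih lo (mid - 1) mid (by omega) hlo
    · rw [posLoop, searchAlt]
      simp [hle, show lo > hi by omega]

theorem est_triee_eq (lst : List Int) : est_triee lst = !sortedViolation lst := by
  unfold est_triee sortedViolation
  have := estTrieeLoop_true lst lst.length 1 (by omega)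
  simpa using this

-- ===== VERDICT (by name: the statement is the Claim_ definition above) =====
theorem position_tri_spec : Claim_equal_position_tri := by
  intro lst element _
  unfold Spec_position_tri position_tri position_tri_alt
  rw [est_triee_eq]
  by_cases hv : sortedViolation lst
  · simp [hv]
  · simp only [hv, Bool.not_false, if_pos, Bool.false_eq_true, if_neg, not_false_iff]
    exact posLoop_eq_searchAlt lst element ((lst.length : Int) - 1 + 1 - 0).toNat 0
      ((lst.length : Int) - 1) 0 le_rfl le_rfl
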